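-- pv_equiv track=rewrite | github.com/qrichert/cronrunner | cronrunner.py | _split_schedule_and_job
-- ===== SOURCE A (Python) =====
-- def _split_schedule_and_job(line: str) -> tuple:
--     """Split schedule and job parts of a job line.
--
--     This is a naive splitter that assumes a schedule consists of
--     either one element if it is a shortcut (e.g., @daily), or five
--     elements if not (e.g., * * * * *, 0 12 * * *, etc.).
--
--     Once the appropriate number of elements is consumed (i.e., the
--     schedule is consumed), it considers the rest to be the job
--     itself.
--     """
--     schedule_length: int = 1 if line.startswith("@") else 5
--     schedule: list = []
--     job: list = []
--     i: int = 0
--     for element in line.split(" "):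
--         # Schedule
--         if i < schedule_length:
--             schedule.append(element)
--             if element:
--                 i += 1
--         # Job
--         else:
--             job.append(element)
--     schedule: str = " ".join(schedule).strip()
--     job: str = " ".join(job).strip()
--     return schedule, job
-- ===== SOURCE B (Python) =====
-- def _split_schedule_and_job(line: str) -> tuple:
--     """Split schedule and job parts of a job line.
--
--     Character-level scan: advance a cursor past N whitespace-separated
--     fields (N = 1 for an @shortcut, 5 otherwise), then cut the line at
--     the cursor; no tokenization into lists is performed.
--     """
--     n: int = 1 if line.startswith("@") else 5
--     i: int = 0
--     count: int = 0
--     while count < n and i < len(line):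
--         while i < len(line) and line[i] == " ":
--             i += 1
--         if i < len(line):
--             while i < len(line) and line[i] != " ":
--                 i += 1
--             count += 1
--     return line[:i].strip(), line[i:].strip()
-- ===== Notes on version B (the rewrite author's own statement) =====
-- stated objective: faster
-- what changed: Replaces tokenize-into-lists-and-rejoin (split on ' ', accumulate schedule/job element lists, ' '.join both) with a character-cursor scan that advances past the first N fields and cuts the line once at that position.
import Mathlib
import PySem

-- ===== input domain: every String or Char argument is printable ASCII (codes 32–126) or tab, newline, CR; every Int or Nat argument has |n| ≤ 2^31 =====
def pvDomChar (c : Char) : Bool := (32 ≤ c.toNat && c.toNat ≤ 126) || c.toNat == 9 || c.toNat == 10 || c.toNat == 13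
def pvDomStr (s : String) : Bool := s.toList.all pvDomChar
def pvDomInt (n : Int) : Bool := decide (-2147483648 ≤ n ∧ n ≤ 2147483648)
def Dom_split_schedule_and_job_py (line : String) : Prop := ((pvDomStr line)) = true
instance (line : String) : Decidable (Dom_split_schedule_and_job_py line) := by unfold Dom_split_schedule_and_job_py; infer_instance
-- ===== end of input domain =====

-- B replaces A's tokenize-and-rejoin with a character-cursor scan that cuts the line once after the Nth field (return value only; neither version mutates anything).

-- ===== PORT A =====
-- loop body of A's for-loop, as a named helper: state is (schedule, job, i)
def pvStepA (n : Int) (st : List String × List String × Int) (element : String) :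
    List String × List String × Int :=
  if st.2.2 < n then
    (st.1 ++ [element], st.2.1, if element ≠ "" then st.2.2 + 1 else st.2.2)
  else
    (st.1, st.2.1 ++ [element], st.2.2)

def split_schedule_and_job_py (line : String) : String × String :=
  let schedule_length : Int := if PySem.Str.startswith line "@" then 1 else 5
  let st := ((PySem.Str.split? line " ").getD []).foldl (pvStepA schedule_length) ([], [], 0)
  (PySem.Str.strip (PySem.Str.join " " st.1), PySem.Str.strip (PySem.Str.join " " st.2.1))

-- ===== PORT B =====
-- B's outer while-loop: each round skips spaces then consumes one field; returns the
-- two slices (line[:i], line[i:]) as the already-cut pair of char lists.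
def pvScan : Nat → List Char → List Char × List Char
  | 0, cs => ([], cs)
  | n+1, cs =>
    let r := cs.dropWhile (fun c => c == ' ')
    if r.isEmpty then (cs, [])
    else
      let sp := cs.takeWhile (fun c => c == ' ')
      let tk := r.takeWhile (fun c => c != ' ')
      let rest := r.dropWhile (fun c => c != ' ')
      let pr := pvScan n rest
      (sp ++ tk ++ pr.1, pr.2)

def split_schedule_and_job_py_alt (line : String) : String × String :=
  let n : Nat := if PySem.Str.startswith line "@" then 1 else 5
  let pr := pvScan n line.toList
  (String.ofList (PySem.Chars.strip pr.1), String.ofList (PySem.Chars.strip pr.2))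

-- ===== PRECONDITION & SPEC =====
def Spec_split_schedule_and_job_py (line : String) (out : String × String) : Prop := out = split_schedule_and_job_py_alt line
instance (line : String) (out : String × String) : Decidable (Spec_split_schedule_and_job_py line out) := by unfold Spec_split_schedule_and_job_py; infer_instance

-- ===== CLAIM (what is proved, stated in full; the proofs are below) =====
def Claim_equal_split_schedule_and_job_py : Prop := ∀ (line : String), Dom_split_schedule_and_job_py line → Spec_split_schedule_and_job_py line (split_schedule_and_job_py line)

-- ===== LEMMAS AND PROOFS =====

-- structural model of line.split(" ")
def pvConsL (x : List Char) : List (List Char) → List (List Char)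
  | [] => [x]
  | p :: ps => (x ++ p) :: ps

def pvSplit : List Char → List (List Char)
  | [] => [[]]
  | c :: cs => if c = ' ' then [] :: pvSplit cs else pvConsL [c] (pvSplit cs)

-- A's loop, cleaned: k = number of fields still wanted for the schedule
def pvG : Nat → List (List Char) → List (List Char) × List (List Char)
  | 0, ps => ([], ps)
  | _+1, [] => ([], [])
  | k+1, p :: ps =>
    let pr := pvG (if p = [] then k+1 else k) ps
    (p :: pr.1, pr.2)

lemma pvSplit_ne_nil (cs : List Char) : pvSplit cs ≠ [] := by
  cases cs with
  | nil => simp [pvSplit]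
  | cons c cs =>
    simp only [pvSplit]
    split
    · simp
    · cases h : pvSplit cs with
      | nil => simp [pvConsL]
      | cons p ps => simp [pvConsL]

lemma pvConsL_assoc (x y : List Char) (ps : List (List Char)) :
    pvConsL x (pvConsL y ps) = pvConsL (x ++ y) ps := by
  cases ps <;> simp [pvConsL]

lemma go_spec : ∀ (fuel : Nat) (l cur : List Char) (acc : List (List Char)),
    l.length ≤ fuel →
    PySem.Chars.splitOn.go [' '] fuel l cur acc = acc.reverse ++ pvConsL cur.reverse (pvSplit l) := by
  intro fuel
  induction fuel with
  | zero =>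
    intro l cur acc hlen
    obtain rfl : l = [] := List.eq_nil_of_length_eq_zero (Nat.le_zero.mp hlen)
    rw [PySem.Chars.splitOn.go.eq_def]
    simp [pvSplit, pvConsL]
  | succ fuel ih =>
    intro l cur acc hlen
    cases l with
    | nil =>
      rw [PySem.Chars.splitOn.go.eq_def]
      simp [pvSplit, pvConsL]
    | cons c rest =>
      rw [PySem.Chars.splitOn.go.eq_def]
      by_cases hc : c = ' '
      · subst hc
        have hpre : ([' '] : List Char).isPrefixOf (' ' :: rest) = true := by
          simp [List.isPrefixOf]
        simp only [hpre, if_true, List.length_singleton, List.drop_succ_cons, List.drop_zero]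
        rw [ih rest [] (cur.reverse :: acc) (by simpa using Nat.succ_le_succ_iff.mp hlen)]
        obtain ⟨p, ps, hps⟩ : ∃ p ps, pvSplit rest = p :: ps := by
          cases h : pvSplit rest with
          | nil => exact absurd h (pvSplit_ne_nil rest)
          | cons p ps => exact ⟨p, ps, rfl⟩
        simp [pvSplit, hps, pvConsL]
      · have hpre : ([' '] : List Char).isPrefixOf (c :: rest) = false := by
          simp [List.isPrefixOf]
          exact fun h => hc h.symm
        simp only [hpre, Bool.false_eq_true, if_false]
        rw [ih rest (c :: cur) acc (by simpa using Nat.succ_le_succ_iff.mp hlen)]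
        rw [show pvSplit (c :: rest) = pvConsL [c] (pvSplit rest) from by simp [pvSplit, hc]]
        rw [pvConsL_assoc]
        simp

lemma splitOn_eq_pvSplit (cs : List Char) : PySem.Chars.splitOn cs [' '] = pvSplit cs := by
  rw [show PySem.Chars.splitOn cs [' '] = PySem.Chars.splitOn.go [' '] (cs.length + 1) cs [] [] from rfl]
  rw [go_spec (cs.length + 1) cs [] [] (by omega)]
  obtain ⟨p, ps, hps⟩ : ∃ p ps, pvSplit cs = p :: ps := by
    cases h : pvSplit cs with
    | nil => exact absurd h (pvSplit_ne_nil cs)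
    | cons p ps => exact ⟨p, ps, rfl⟩
  simp [hps, pvConsL]

lemma join_cons_ne (p : List Char) (S : List (List Char)) (hS : S ≠ []) :
    PySem.Chars.join [' '] (p :: S) = p ++ ' ' :: PySem.Chars.join [' '] S := by
  cases S with
  | nil => exact absurd rfl hS
  | cons q t => rw [PySem.Chars.join_cons_cons]; simp

lemma join_pvSplit (cs : List Char) : PySem.Chars.join [' '] (pvSplit cs) = cs := by
  induction cs with
  | nil => simp [pvSplit, PySem.Chars.join_singleton]
  | cons c cs ih =>
    by_cases hc : c = ' '
    · subst hc
      rw [show pvSplit (' ' :: cs) = [] :: pvSplit cs from by simp [pvSplit]]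
      rw [join_cons_ne [] (pvSplit cs) (pvSplit_ne_nil cs), ih]
      simp
    · simp only [pvSplit, if_neg hc]
      obtain ⟨p, ps, hps⟩ : ∃ p ps, pvSplit cs = p :: ps := by
        cases h : pvSplit cs with
        | nil => exact absurd h (pvSplit_ne_nil cs)
        | cons p ps => exact ⟨p, ps, rfl⟩
      rw [hps] at ih ⊢
      cases ps with
      | nil => simp [pvConsL, PySem.Chars.join_singleton] at ih ⊢; simp [ih]
      | cons q t =>
        simp only [pvConsL]
        rw [join_cons_ne _ (q :: t) (by simp)]
        rw [join_cons_ne _ (q :: t) (by simp)] at ih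
        rw [← ih]
        simp

lemma pvG_nil (k : Nat) : pvG k [] = ([], []) := by
  cases k <;> simp [pvG]

lemma pvG_fst_ne_nil (k : Nat) (hk : 1 ≤ k) (l : List (List Char)) (hl : l ≠ []) :
    (pvG k l).1 ≠ [] := by
  cases k with
  | zero => omega
  | succ k =>
    cases l with
    | nil => exact absurd rfl hl
    | cons p ps => simp [pvG]

lemma pvScan_nil (m : Nat) : pvScan m [] = ([], []) := by
  cases m <;> simp [pvScan]

lemma pvScan_space (n : Nat) (cs : List Char) :
    pvScan (n+1) (' ' :: cs) = (' ' :: (pvScan (n+1) cs).1, (pvScan (n+1) cs).2) := by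
  by_cases h : (cs.dropWhile (fun c => c == ' ')).isEmpty <;>
    simp [pvScan, List.dropWhile_cons, List.takeWhile_cons, h]

lemma dropWhile_head (cs : List Char) (x : Char) (rest : List Char)
    (h : cs.dropWhile (fun c => c != ' ') = x :: rest) : x = ' ' := by
  induction cs with
  | nil => simp at h
  | cons c cs ih =>
    by_cases hc : c = ' '
    · subst hc
      simp [List.dropWhile_cons] at h
      exact h.1.symm
    · rw [List.dropWhile_cons] at h
      simp [hc] at h
      exact ih h

lemma pvSplit_tok (cs rest : List Char)
    (h : cs.dropWhile (fun c => c != ' ') = ' ' :: rest) :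
    pvSplit cs = (cs.takeWhile (fun c => c != ' ')) :: pvSplit rest := by
  induction cs with
  | nil => simp at h
  | cons c cs ih =>
    by_cases hc : c = ' '
    · subst hc
      simp [List.dropWhile_cons] at h
      simp [pvSplit, List.takeWhile_cons, h]
    · rw [List.dropWhile_cons] at h
      simp only [bne_iff_ne, ne_eq, hc, not_false_iff, if_true] at h
      have := ih h
      simp [pvSplit, hc, List.takeWhile_cons, this, pvConsL]

lemma pvSplit_notok (cs : List Char)
    (h : cs.dropWhile (fun c => c != ' ') = []) :
    pvSplit cs = [cs] := by
  induction cs with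
  | nil => simp [pvSplit]
  | cons c cs ih =>
    by_cases hc : c = ' '
    · subst hc; simp [List.dropWhile_cons] at h
    · rw [List.dropWhile_cons] at h
      simp only [bne_iff_ne, ne_eq, hc, not_false_iff, if_true] at h
      simp [pvSplit, hc, ih h, pvConsL]

lemma pvMain : ∀ (N : Nat) (cs : List Char) (k : Nat), cs.length ≤ N → 1 ≤ k →
    (pvScan k cs).1 = PySem.Chars.join [' '] (pvG k (pvSplit cs)).1 ∧
    ((pvScan k cs).2 = [] ∧ (pvG k (pvSplit cs)).2 = []
      ∨ (pvScan k cs).2 = ' ' :: PySem.Chars.join [' '] (pvG k (pvSplit cs)).2) := by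
  intro N
  induction N with
  | zero =>
    intro cs k hlen hk
    obtain rfl : cs = [] := List.eq_nil_of_length_eq_zero (Nat.le_zero.mp hlen)
    obtain ⟨m, rfl⟩ : ∃ m, k = m + 1 := ⟨k - 1, by omega⟩
    simp [pvScan_nil, pvSplit, pvG, pvG_nil, PySem.Chars.join_singleton]
  | succ N ih =>
    intro cs k hlen hk
    obtain ⟨m, rfl⟩ : ∃ m, k = m + 1 := ⟨k - 1, by omega⟩
    cases cs with
    | nil => simp [pvScan_nil, pvSplit, pvG, pvG_nil, PySem.Chars.join_singleton]
    | cons c cs =>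
      by_cases hc : c = ' '
      · subst hc
        have H := ih cs (m+1) (by simpa using Nat.succ_le_succ_iff.mp hlen) hk
        have hS := pvG_fst_ne_nil (m+1) hk (pvSplit cs) (pvSplit_ne_nil cs)
        rw [pvScan_space]
        rw [show pvSplit (' ' :: cs) = [] :: pvSplit cs from by simp [pvSplit]]
        have h1 : (pvG (m+1) ([] :: pvSplit cs)).1 = [] :: (pvG (m+1) (pvSplit cs)).1 := by
          simp [pvG]
        have h2 : (pvG (m+1) ([] :: pvSplit cs)).2 = (pvG (m+1) (pvSplit cs)).2 := by
          simp [pvG]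
        refine ⟨?_, ?_⟩
        · rw [h1, join_cons_ne [] _ hS, H.1]; simp
        · rw [h2]; exact H.2
      · have hdc : (c :: cs).dropWhile (fun x => x == ' ') = c :: cs := by
          simp [List.dropWhile_cons, hc]
        have expand : pvScan (m+1) (c :: cs)
            = ((c :: cs.takeWhile (fun x => x != ' ')) ++ (pvScan m (cs.dropWhile (fun x => x != ' '))).1,
               (pvScan m (cs.dropWhile (fun x => x != ' '))).2) := by
          simp [pvScan, hdc, List.takeWhile_cons, List.dropWhile_cons, hc]
        cases hD : cs.dropWhile (fun x => x != ' ') with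
        | nil =>
          have htw : cs.takeWhile (fun x => x != ' ') = cs := by
            have h2 := List.takeWhile_append_dropWhile (p := fun x => x != ' ') (l := cs)
            rw [hD] at h2
            simpa using h2
          have hsplit : pvSplit (c :: cs) = [c :: cs] := by
            refine pvSplit_notok (c :: cs) ?_
            rw [List.dropWhile_cons]
            simp [hc, hD]
          rw [expand, hD, hsplit, htw, pvScan_nil]
          have hG : pvG (m+1) [c :: cs] = ([c :: cs], []) := by
            simp [pvG, pvG_nil]
          rw [hG]
          exact ⟨by simp [PySem.Chars.join_singleton], Or.inl ⟨rfl, rfl⟩⟩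
        | cons x rest =>
          obtain rfl : x = ' ' := dropWhile_head cs x rest hD
          have hsplit : pvSplit (c :: cs) = (c :: cs.takeWhile (fun x => x != ' ')) :: pvSplit rest := by
            have := pvSplit_tok (c :: cs) rest (by rw [List.dropWhile_cons]; simp [hc, hD])
            rw [this]
            simp [List.takeWhile_cons, hc]
          have hG : pvG (m+1) ((c :: cs.takeWhile (fun x => x != ' ')) :: pvSplit rest)
              = ((c :: cs.takeWhile (fun x => x != ' ')) :: (pvG m (pvSplit rest)).1,
                 (pvG m (pvSplit rest)).2) := by
            simp [pvG]
          rw [expand, hD, hsplit, hG]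
          cases m with
          | zero =>
            refine ⟨?_, Or.inr ?_⟩
            · simp [pvScan, pvG, PySem.Chars.join_singleton]
            · simp [pvScan, pvG, join_pvSplit]
          | succ m' =>
            have hlen' : rest.length ≤ N := by
              have h1 := List.length_dropWhile_le (fun x => x != ' ') cs
              rw [hD] at h1
              simp at h1 hlen
              omega
            have H := ih rest (m'+1) hlen' (by omega)
            have hS := pvG_fst_ne_nil (m'+1) (by omega) (pvSplit rest) (pvSplit_ne_nil rest)
            rw [pvScan_space]
            refine ⟨?_, H.2⟩
            rw [join_cons_ne _ _ hS, H.1]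

lemma foldlA (n : Int) : ∀ (l : List (List Char)) (sch job : List String) (i : Int), 0 ≤ i →
    ∃ i', List.foldl (pvStepA n) (sch, job, i) (l.map String.ofList)
      = (sch ++ ((pvG (n-i).toNat l).1).map String.ofList,
         job ++ ((pvG (n-i).toNat l).2).map String.ofList, i') := by
  intro l
  induction l with
  | nil =>
    intro sch job i hi
    exact ⟨i, by simp [pvG_nil]⟩
  | cons p ps ih =>
    intro sch job i hi
    simp only [List.map_cons, List.foldl_cons]
    by_cases hlt : i < n
    · by_cases hp : p = []
      · subst hp
        have hstep : pvStepA n (sch, job, i) (String.ofList []) = (sch ++ [String.ofList []], job, i) := by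
          simp [pvStepA, hlt]
        rw [hstep]
        obtain ⟨i', hrec⟩ := ih (sch ++ [String.ofList []]) job i hi
        refine ⟨i', ?_⟩
        rw [hrec]
        obtain ⟨k0, hk0⟩ : ∃ k0, (n-i).toNat = k0 + 1 := ⟨(n-i).toNat - 1, by omega⟩
        have hG : pvG (k0+1) ([] :: ps) = ([] :: (pvG (k0+1) ps).1, (pvG (k0+1) ps).2) := by
          simp [pvG]
        simp [hk0, hG]
      · have hne : String.ofList p ≠ "" := by simpa [String.ofList_eq_empty_iff] using hp
        have hstep : pvStepA n (sch, job, i) (String.ofList p) = (sch ++ [String.ofList p], job, i + 1) := by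
          simp [pvStepA, hlt, hne]
        rw [hstep]
        obtain ⟨i', hrec⟩ := ih (sch ++ [String.ofList p]) job (i+1) (by omega)
        refine ⟨i', ?_⟩
        rw [hrec]
        obtain ⟨k0, hk0⟩ : ∃ k0, (n-i).toNat = k0 + 1 := ⟨(n-i).toNat - 1, by omega⟩
        have hk1 : (n-(i+1)).toNat = k0 := by omega
        have hG : pvG (k0+1) (p :: ps) = (p :: (pvG k0 ps).1, (pvG k0 ps).2) := by
          simp [pvG, hp]
        simp [hk0, hk1, hG]
    · have hstep : pvStepA n (sch, job, i) (String.ofList p) = (sch, job ++ [String.ofList p], i) := by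
        simp [pvStepA, hlt]
      rw [hstep]
      obtain ⟨i', hrec⟩ := ih sch (job ++ [String.ofList p]) i hi
      refine ⟨i', ?_⟩
      rw [hrec]
      have h0 : (n-i).toNat = 0 := by omega
      simp [h0, pvG]

lemma strip_cons_space (x : List Char) : PySem.Chars.strip (' ' :: x) = PySem.Chars.strip x := by
  have hsp : PySem.Chars.isspace ' ' = true := rfl
  simp [PySem.Chars.strip, PySem.Chars.lstrip, List.dropWhile_cons, hsp]

lemma core (line : String) (nA : Int) (k : Nat) (hk : 1 ≤ k) (hnk : nA = (k : Int)) :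
    (PySem.Str.strip (PySem.Str.join " " (((PySem.Str.split? line " ").getD []).foldl (pvStepA nA) ([], [], 0)).1),
     PySem.Str.strip (PySem.Str.join " " (((PySem.Str.split? line " ").getD []).foldl (pvStepA nA) ([], [], 0)).2.1))
    = (String.ofList (PySem.Chars.strip (pvScan k line.toList).1),
       String.ofList (PySem.Chars.strip (pvScan k line.toList).2)) := by
  have hsep : (" " : String).toList = [' '] := rfl
  have hsplit : (PySem.Str.split? line " ").getD [] = (pvSplit line.toList).map String.ofList := by
    simp [PySem.Str.split?, PySem.Chars.split?, hsep, splitOn_eq_pvSplit]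
  rw [hsplit]
  obtain ⟨i', hfold⟩ := foldlA nA (pvSplit line.toList) [] [] 0 le_rfl
  have hkk : (nA - 0).toNat = k := by omega
  rw [hkk] at hfold
  rw [hfold]
  obtain ⟨h1, h2⟩ := pvMain line.toList.length line.toList k le_rfl hk
  have hstr : ∀ parts : List (List Char),
      PySem.Str.strip (PySem.Str.join " " (parts.map String.ofList))
        = String.ofList (PySem.Chars.strip (PySem.Chars.join [' '] parts)) := by
    intro parts
    simp [PySem.Str.strip, PySem.Str.toList_join, hsep, List.map_map, Function.comp_def, String.toList_ofList]
  simp only [List.nil_append, Prod.mk.injEq]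
  refine ⟨?_, ?_⟩
  · rw [hstr, h1]
  · rw [hstr]
    rcases h2 with ⟨hr, hJ⟩ | hr
    · rw [hJ, hr, PySem.Chars.join_nil]
    · rw [hr, strip_cons_space]

-- ===== VERDICT (by name: the statement is the Claim_ definition above) =====
theorem split_schedule_and_job_py_spec : Claim_equal_split_schedule_and_job_py := by
  intro line _
  unfold Spec_split_schedule_and_job_py split_schedule_and_job_py split_schedule_and_job_py_alt
  by_cases h : PySem.Str.startswith line "@" <;> simp only [h, if_true] <;>
    [exact core line 1 1 le_rfl rfl; exact core line 5 5 (by omega) rfl]
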